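-- pv_equiv track=rewrite | github.com/mikaelfun/Leetcode | codingChallenge1.py | maxScoreRec
-- ===== SOURCE A (Python) =====
-- def maxScoreRec(arr):
--     if len(arr) == 0:
--         return 0
--     if len(arr) == 1:
--         return arr[0]
--     if len(arr) == arr.count(arr[0]):
--         return arr[0]*len(arr)
--     # by this time we definitely have arr[0]+1 as an element
--     return max(arr[0]*len(arr)+maxScoreRec(arr[arr.count(arr[0])+arr.count(arr[0]-1):]), maxScoreRec(arr[arr.count(arr[0]):]))
-- ===== SOURCE B (Python) =====
-- def maxScoreRec(arr):
--     # Bottom-up DP over suffix start indices: dp[j] = answer for arr[i+1+j:],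
--     # computed once per index instead of A's exponential branching recursion.
--     dp = [0]
--     for i in range(len(arr) - 1, -1, -1):
--         s = arr[i:]
--         m = len(s)
--         s0 = s[0]
--         c0 = s.count(s0)
--         if c0 == m:
--             v = s0 * m
--         else:
--             c1 = s.count(s0 - 1)
--             v = max(s0 * m + dp[c0 + c1 - 1], dp[c0 - 1])
--         dp = [v] + dp
--     return dp[0]
-- ===== Notes on version B (the rewrite author's own statement) =====
-- stated objective: faster
-- what changed: Replaces A's branching recursion over suffixes (exponentially many overlapping calls) with a bottom-up DP table indexed by suffix start, computing each of the n suffix answers once.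
import Mathlib
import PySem

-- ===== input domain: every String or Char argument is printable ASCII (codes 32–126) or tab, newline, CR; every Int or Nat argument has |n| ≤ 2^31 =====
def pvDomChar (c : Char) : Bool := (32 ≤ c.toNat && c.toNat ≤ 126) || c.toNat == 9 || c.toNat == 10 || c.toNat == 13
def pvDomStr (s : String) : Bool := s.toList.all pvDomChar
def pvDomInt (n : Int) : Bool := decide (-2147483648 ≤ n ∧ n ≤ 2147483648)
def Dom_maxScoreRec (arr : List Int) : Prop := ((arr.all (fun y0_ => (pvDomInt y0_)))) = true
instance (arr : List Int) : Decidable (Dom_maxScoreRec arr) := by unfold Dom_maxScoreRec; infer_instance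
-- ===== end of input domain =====

-- B replaces A's exponential take/skip recursion on suffixes with a bottom-up DP over suffix
-- start indices (each suffix answer computed once); equivalence of return values is proved below.

-- ===== PORT A =====
-- literal transliteration of A's recursion (slices via PySem.List.slice, counts via PySem.List.count)
def maxScoreRec (arr : List Int) : Int :=
  if arr.length = 0 then 0
  else if arr.length = 1 then PySem.List.pyGetD arr 0 0
  else if (arr.length : Int) = (PySem.List.count arr (PySem.List.pyGetD arr 0 0) : Int) then
    PySem.List.pyGetD arr 0 0 * arr.length
  else
    max (PySem.List.pyGetD arr 0 0 * arr.length +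
          maxScoreRec (PySem.List.slice arr
            (some ((PySem.List.count arr (PySem.List.pyGetD arr 0 0)
                     + PySem.List.count arr (PySem.List.pyGetD arr 0 0 - 1) : Nat) : Int)) none))
        (maxScoreRec (PySem.List.slice arr
            (some ((PySem.List.count arr (PySem.List.pyGetD arr 0 0) : Nat) : Int)) none))
termination_by arr.length
decreasing_by
  · rw [PySem.List.slice_from_natCast]
    have hne : arr ≠ [] := by intro h; simp [h] at *
    have : 1 ≤ PySem.List.count arr (PySem.List.pyGetD arr 0 0) := by
      rw [PySem.List.count_eq]
      exact List.count_pos_iff.mpr (by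
        cases arr with
        | nil => exact absurd rfl hne
        | cons a t => simp [PySem.List.pyGetD_zero_cons])
    simp only [List.length_drop]
    omega
  · rw [PySem.List.slice_from_natCast]
    have hne : arr ≠ [] := by intro h; simp [h] at *
    have : 1 ≤ PySem.List.count arr (PySem.List.pyGetD arr 0 0) := by
      rw [PySem.List.count_eq]
      exact List.count_pos_iff.mpr (by
        cases arr with
        | nil => exact absurd rfl hne
        | cons a t => simp [PySem.List.pyGetD_zero_cons])
    simp only [List.length_drop]
    omega

-- ===== PORT B =====
-- literal transliteration of Source B: reverse index loop building the DP list front-to-back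
def pvStep (arr : List Int) (dp : List Int) (i : Int) : List Int :=
  let s := PySem.List.slice arr (some i) none
  let m : Int := s.length
  let s0 := PySem.List.pyGetD s 0 0
  let c0 : Int := PySem.List.count s s0
  let v :=
    if c0 = m then s0 * m
    else
      let c1 : Int := PySem.List.count s (s0 - 1)
      max (s0 * m + PySem.List.pyGetD dp (c0 + c1 - 1) 0) (PySem.List.pyGetD dp (c0 - 1) 0)
  v :: dp

def maxScoreRec_alt (arr : List Int) : Int :=
  let dp := (PySem.List.pyRange ((arr.length : Int) - 1) (-1) (-1)).foldl (pvStep arr) [0]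
  PySem.List.pyGetD dp 0 0

-- ===== PRECONDITION & SPEC =====
def Spec_maxScoreRec (arr : List Int) (out : Int) : Prop := out = maxScoreRec_alt arr
instance (arr : List Int) (out : Int) : Decidable (Spec_maxScoreRec arr out) := by unfold Spec_maxScoreRec; infer_instance

-- ===== CLAIM (what is proved, stated in full; the proofs are below) =====
def Claim_equal_maxScoreRec : Prop := ∀ (arr : List Int), Dom_maxScoreRec arr → Spec_maxScoreRec arr (maxScoreRec arr)

-- ===== LEMMAS AND PROOFS =====

-- counts of two distinct values never exceed the length
lemma count_add_count_le_length (xs : List Int) (a b : Int) (hab : a ≠ b) :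
    List.count a xs + List.count b xs ≤ xs.length := by
  induction xs with
  | nil => simp
  | cons x t ih =>
    by_cases hxa : x = a <;> by_cases hxb : x = b <;> simp_all <;> omega

-- one unfolding of A, phrased over drops (the shape B's loop body computes)
lemma maxScoreRec_unfold (s : List Int) (hs : s ≠ []) :
    maxScoreRec s =
      if (PySem.List.count s (PySem.List.pyGetD s 0 0) : Int) = (s.length : Int) then
        PySem.List.pyGetD s 0 0 * s.length
      else
        max (PySem.List.pyGetD s 0 0 * s.length +
              maxScoreRec (s.drop (PySem.List.count s (PySem.List.pyGetD s 0 0)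
                                   + PySem.List.count s (PySem.List.pyGetD s 0 0 - 1))))
            (maxScoreRec (s.drop (PySem.List.count s (PySem.List.pyGetD s 0 0)))) := by
  rw [maxScoreRec]
  rcases s with _ | ⟨a, t⟩
  · exact absurd rfl hs
  rcases t with _ | ⟨b, t⟩
  · simp [PySem.List.count_eq, PySem.List.pyGetD_zero_cons]
  · have hlen : (a :: b :: t).length ≠ 0 := by simp
    have hlen1 : (a :: b :: t).length ≠ 1 := by simp
    simp only [if_neg hlen, if_neg hlen1]
    rw [PySem.List.slice_from_natCast, PySem.List.slice_from_natCast]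
    by_cases hc : ((a :: b :: t).length : Int) = (PySem.List.count (a::b::t) (PySem.List.pyGetD (a::b::t) 0 0) : Int)
    · rw [if_pos hc, if_pos hc.symm]
    · rw [if_neg hc, if_neg (fun h => hc h.symm)]

-- the DP list after the loop has processed indices ≥ i
def pvDp (arr : List Int) (i : Nat) : List Int :=
  (List.range (arr.length - i + 1)).map (fun k => maxScoreRec (arr.drop (i + k)))

lemma pvDp_getD (arr : List Int) (i k : Nat) (hk : k ≤ arr.length - i) :
    (pvDp arr i).getD k 0 = maxScoreRec (arr.drop (i + k)) := by
  unfold pvDp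
  rw [List.getD_eq_getElem?_getD, List.getElem?_map, List.getElem?_range (by omega)]
  rfl

lemma pvDp_cons (arr : List Int) (i : Nat) (hi : i < arr.length) :
    pvDp arr i = maxScoreRec (arr.drop i) :: pvDp arr (i + 1) := by
  unfold pvDp
  have h : arr.length - i + 1 = (arr.length - (i + 1) + 1) + 1 := by omega
  rw [h, List.range_succ_eq_map]
  simp only [List.map_cons, List.map_map, Nat.add_zero]
  congr 1
  apply List.map_congr_left
  intro k _
  simp only [Function.comp_apply, Nat.succ_eq_add_one]
  congr 2
  omega

lemma pvStep_eq (arr : List Int) (i : Nat) (hi : i < arr.length) :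
    pvStep arr (pvDp arr (i + 1)) (i : Int) = pvDp arr i := by
  have hs : PySem.List.slice arr (some (i : Int)) none = arr.drop i :=
    PySem.List.slice_from_natCast arr i
  set s := arr.drop i with hsdef
  have hsne : s ≠ [] := by
    intro h
    have := congrArg List.length h
    simp only [hsdef, List.length_drop, List.length_nil] at this
    omega
  have hslen : s.length = arr.length - i := by simp [hsdef]
  have hc0pos : 1 ≤ PySem.List.count s (PySem.List.pyGetD s 0 0) := by
    rw [PySem.List.count_eq]
    refine List.count_pos_iff.mpr ?_
    rcases s with _ | ⟨a, t⟩
    · exact absurd rfl hsne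
    · simp [PySem.List.pyGetD_zero_cons]
  unfold pvStep
  simp only [hs]
  rw [pvDp_cons arr i hi, maxScoreRec_unfold s hsne]
  set s0 := PySem.List.pyGetD s 0 0 with hs0
  set c0 := PySem.List.count s s0 with hc0
  set c1 := PySem.List.count s (s0 - 1) with hc1
  have hcc : c0 + c1 ≤ s.length := by
    rw [hc0, hc1, PySem.List.count_eq, PySem.List.count_eq]
    exact count_add_count_le_length s s0 (s0 - 1) (by omega)
  congr 1
  by_cases hc : (c0 : Int) = (s.length : Int)
  · rw [if_pos hc, if_pos hc]
  · rw [if_neg hc, if_neg hc]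
    have e1 : ((c0 : Int) + (c1 : Int) - 1) = ((c0 + c1 - 1 : Nat) : Int) := by omega
    have e2 : ((c0 : Int) - 1) = ((c0 - 1 : Nat) : Int) := by omega
    rw [e1, e2, PySem.List.pyGetD_natCast, PySem.List.pyGetD_natCast]
    rw [pvDp_getD arr (i+1) (c0 + c1 - 1) (by omega), pvDp_getD arr (i+1) (c0 - 1) (by omega)]
    have d1 : arr.drop (i + 1 + (c0 + c1 - 1)) = s.drop (c0 + c1) := by
      rw [hsdef, List.drop_drop]
      congr 1
      omega
    have d2 : arr.drop (i + 1 + (c0 - 1)) = s.drop c0 := by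
      rw [hsdef, List.drop_drop]
      congr 1
      omega
    rw [d1, d2]

lemma loop_inv (arr : List Int) (i : Nat) (hi : i ≤ arr.length) :
    (PySem.List.pyRange ((i : Int) - 1) (-1) (-1)).foldl (pvStep arr) (pvDp arr i)
      = pvDp arr 0 := by
  induction i with
  | zero =>
    rw [PySem.List.pyRange_neg_one_eq_nil (by norm_num)]
    simp
  | succ j ih =>
    have h1 : ((j + 1 : Nat) : Int) - 1 = (j : Int) := by push_cast; ring
    rw [h1, PySem.List.pyRange_neg_one_cons (by omega), List.foldl_cons,
        pvStep_eq arr j (by omega)]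
    exact ih (by omega)

lemma maxScoreRec_nil : maxScoreRec [] = 0 := by rw [maxScoreRec]; simp

-- ===== VERDICT (by name: the statement is the Claim_ definition above) =====
theorem maxScoreRec_spec : Claim_equal_maxScoreRec := by
  intro arr _
  unfold Spec_maxScoreRec maxScoreRec_alt
  have hstart : pvDp arr arr.length = [0] := by
    unfold pvDp
    simp [List.drop_length, maxScoreRec_nil]
  rw [← hstart, loop_inv arr arr.length le_rfl, PySem.List.pyGetD_zero,
      pvDp_getD arr 0 0 (by omega)]
  simp
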